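-- pv_equiv track=rewrite | github.com/ament/ament_tools | ament_tools/verbs/build_pkg/build_types/ament_cmake.py | extract_cmake_and_make_arguments
-- ===== SOURCE A (Python) =====
-- def extract_cmake_and_make_arguments(args):
--     cmake_args = []
--     make_args = []
--
--     arg_types = {
--         '--cmake-args': cmake_args,
--         '--make-args': make_args
--     }
--
--     arg_indexes = {}
--     for k in arg_types.keys():
--         if k in args:
--             arg_indexes[args.index(k)] = k
--
--     def split_arguments(args, splitter_name, default=None):
--         if splitter_name not in args:
--             return args, default
--         index = args.index(splitter_name)
--         return args[0:index], args[index + 1:]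
--
--     for index in reversed(sorted(arg_indexes.keys())):
--         arg_type = arg_indexes[index]
--         args, specific_args = split_arguments(args, arg_type)
--         arg_types[arg_type].extend(specific_args)
--
--     return args, cmake_args, make_args
-- ===== SOURCE B (Python) =====
-- def extract_cmake_and_make_arguments(args):
--     head = []
--     cmake_args = []
--     make_args = []
--     groups = {'--cmake-args': cmake_args, '--make-args': make_args}
--     current = head
--     seen = set()
--     for token in args:
--         if token in groups and token not in seen:
--             seen.add(token)
--             current = groups[token]
--         else:
--             current.append(token)
--     return head, cmake_args, make_args
-- ===== Notes on version B (the rewrite author's own statement) =====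
-- stated objective: idiomatic
-- what changed: Replaced the index dictionary, reverse-sorted index loop and repeated list.index/slicing with a single forward pass that switches the current output group at the first occurrence of each marker.
import Mathlib
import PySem

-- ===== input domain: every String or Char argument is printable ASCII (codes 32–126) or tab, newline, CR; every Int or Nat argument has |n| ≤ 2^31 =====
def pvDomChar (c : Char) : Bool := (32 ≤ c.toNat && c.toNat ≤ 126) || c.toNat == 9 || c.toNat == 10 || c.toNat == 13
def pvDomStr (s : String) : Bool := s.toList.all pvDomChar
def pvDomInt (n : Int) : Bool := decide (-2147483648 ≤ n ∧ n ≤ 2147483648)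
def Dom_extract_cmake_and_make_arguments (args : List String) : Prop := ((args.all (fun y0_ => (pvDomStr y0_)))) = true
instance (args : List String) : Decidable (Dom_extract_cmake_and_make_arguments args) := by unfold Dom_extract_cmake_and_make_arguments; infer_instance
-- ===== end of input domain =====

-- B replaces A's index dictionary, reverse-sorted index loop and repeated list.index/slicing with a
-- single forward pass that switches the current output group at the first occurrence of each marker.

-- ===== PORT A =====
def pySplitArguments (args : List String) (splitter : String) :
    List String × Option (List String) :=
  if args.contains splitter then
    let index := (PySem.List.index? args splitter).getD 0
    (PySem.List.slice args (some 0) (some (index : Int)),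
     some (PySem.List.slice args (some ((index : Int) + 1)) none))
  else (args, none)

def extract_cmake_and_make_arguments (args : List String) :
    List String × List String × List String :=
  let keys : List String := ["--cmake-args", "--make-args"]
  let arg_indexes : PySem.Dict Nat String :=
    keys.foldl (fun d k =>
      if args.contains k then d.insert ((PySem.List.index? args k).getD 0) k else d)
      PySem.Dict.empty
  let idxs := (PySem.List.sorted arg_indexes.keys (fun x => x) false).reverse
  idxs.foldl (fun st index =>
    let argType := (arg_indexes.get? index).getD ""
    let res := pySplitArguments st.1 argType
    let specific := res.2.getD []
    if argType == "--cmake-args" then (res.1, st.2.1 ++ specific, st.2.2)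
    else (res.1, st.2.1, st.2.2 ++ specific))
    (args, ([] : List String), ([] : List String))

-- ===== PORT B =====
-- the forward pass of Source B: cur = 0 (head), 1 (cmake_args), 2 (make_args)
def altGo : List String → List String → List String → List String → Nat → List String →
    List String × List String × List String
  | [], h, c, m, _, _ => (h, c, m)
  | t :: rest, h, c, m, cur, seen =>
    if (t == "--cmake-args" || t == "--make-args") && !(seen.contains t) then
      altGo rest h c m (if t == "--cmake-args" then 1 else 2) (PySem.Set.add seen t)
    else if cur == 1 then altGo rest h (c ++ [t]) m cur seen
    else if cur == 2 then altGo rest h c (m ++ [t]) cur seen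
    else altGo rest (h ++ [t]) c m cur seen

def extract_cmake_and_make_arguments_alt (args : List String) :
    List String × List String × List String :=
  altGo args [] [] [] 0 (PySem.Set.ofList [])

-- ===== PRECONDITION & SPEC =====
def Spec_extract_cmake_and_make_arguments (args : List String) (out : List String × List String × List String) : Prop := out = extract_cmake_and_make_arguments_alt args
instance (args : List String) (out : List String × List String × List String) : Decidable (Spec_extract_cmake_and_make_arguments args out) := by unfold Spec_extract_cmake_and_make_arguments; infer_instance

-- ===== CLAIM (what is proved, stated in full; the proofs are below) =====
def Claim_equal_extract_cmake_and_make_arguments : Prop := ∀ (args : List String), Dom_extract_cmake_and_make_arguments args → Spec_extract_cmake_and_make_arguments args (extract_cmake_and_make_arguments args)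

-- ===== LEMMAS AND PROOFS =====
-- the loop condition of altGo is false for tokens whose marker status is already in seen
theorem markerCondFalse (t : String) (seen : List String)
    (h : (t = "--cmake-args" ∨ t = "--make-args") → t ∈ seen) :
    (((t == "--cmake-args") || (t == "--make-args")) && !(seen.contains t)) = false := by
  by_cases h1 : t = "--cmake-args"
  · simp
    exact fun _ => h (Or.inl h1)
  · by_cases h2 : t = "--make-args"
    · simp
      exact fun _ => h (Or.inr h2)
    · simp [h1, h2]

theorem altGo_pass0 (rest tail h c m seen : List String)
    (hp : ∀ t ∈ rest, (t = "--cmake-args" ∨ t = "--make-args") → t ∈ seen) :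
    altGo (rest ++ tail) h c m 0 seen = altGo tail (h ++ rest) c m 0 seen := by
  induction rest generalizing h with
  | nil => simp
  | cons t r ih =>
    simp only [List.cons_append, altGo, markerCondFalse t seen (hp t List.mem_cons_self),
      Bool.false_eq_true, if_false]
    rw [if_neg (by decide), if_neg (by decide)]
    rw [ih (h ++ [t]) (fun t ht => hp t (List.mem_cons_of_mem _ ht))]
    simp

theorem altGo_pass1 (rest tail h c m seen : List String)
    (hp : ∀ t ∈ rest, (t = "--cmake-args" ∨ t = "--make-args") → t ∈ seen) :
    altGo (rest ++ tail) h c m 1 seen = altGo tail h (c ++ rest) m 1 seen := by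
  induction rest generalizing c with
  | nil => simp
  | cons t r ih =>
    simp only [List.cons_append, altGo, markerCondFalse t seen (hp t List.mem_cons_self),
      Bool.false_eq_true, if_false]
    rw [if_pos (by decide)]
    rw [ih (c ++ [t]) (fun t ht => hp t (List.mem_cons_of_mem _ ht))]
    simp

theorem altGo_pass2 (rest tail h c m seen : List String)
    (hp : ∀ t ∈ rest, (t = "--cmake-args" ∨ t = "--make-args") → t ∈ seen) :
    altGo (rest ++ tail) h c m 2 seen = altGo tail h c (m ++ rest) 2 seen := by
  induction rest generalizing m with
  | nil => simp
  | cons t r ih =>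
    simp only [List.cons_append, altGo, markerCondFalse t seen (hp t List.mem_cons_self),
      Bool.false_eq_true, if_false]
    rw [if_neg (by decide), if_pos (by decide)]
    rw [ih (m ++ [t]) (fun t ht => hp t (List.mem_cons_of_mem _ ht))]
    simp

-- first-occurrence decomposition
theorem first_split {α : Type} [DecidableEq α] (v : α) (l : List α) (h : v ∈ l) :
    ∃ p q, l = p ++ v :: q ∧ v ∉ p := by
  induction l with
  | nil => cases h
  | cons a t ih =>
    by_cases ha : a = v
    · exact ⟨[], t, by simp [ha], by simp⟩
    · have hvt : v ∈ t := by
        rcases List.mem_cons.1 h with h' | h'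
        · exact absurd h'.symm ha
        · exact h'
      rcases ih hvt with ⟨p, q, rfl, hv⟩
      refine ⟨a :: p, q, rfl, ?_⟩
      simp only [List.mem_cons, not_or]
      exact ⟨fun h' => ha h'.symm, hv⟩

theorem pySplit_first (p q : List String) (x : String) (hx : x ∉ p) :
    pySplitArguments (p ++ x :: q) x = (p, some q) := by
  have hidx : PySem.List.index? (p ++ x :: q) x = some p.length := by
    rw [PySem.List.index?_eq_some_iff]
    exact ⟨p, q, rfl, rfl, hx⟩
  have hco : (p ++ x :: q).contains x = true := by simp
  rw [pySplitArguments, if_pos hco, hidx]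
  simp only [Option.getD_some]
  have hA : PySem.List.slice (p ++ x :: q) (some 0) (some (p.length : Int)) = p := by
    rw [PySem.List.slice_zero_start, PySem.List.slice_to_natCast]
    simp
  have hB : PySem.List.slice (p ++ x :: q) (some ((p.length : Int) + 1)) none = q := by
    have h1 : ((p.length : Int) + 1) = ((p.length + 1 : Nat) : Int) := by push_cast; ring
    rw [h1, PySem.List.slice_from_natCast]
    have h2 : p ++ x :: q = (p ++ [x]) ++ q := by simp
    have h3 : (p ++ [x]).length = p.length + 1 := by simp
    rw [h2, ← h3, List.drop_left]
  rw [hA, hB]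

theorem altGo_step_new (t : String) (rest h c m : List String) (cur : Nat) (seen : List String)
    (hmk : t = "--cmake-args" ∨ t = "--make-args") (hns : t ∉ seen) :
    altGo (t :: rest) h c m cur seen
      = altGo rest h c m (if t == "--cmake-args" then 1 else 2) (PySem.Set.add seen t) := by
  have hcond : (((t == "--cmake-args") || (t == "--make-args")) && !(seen.contains t)) = true := by
    rcases hmk with rfl | rfl <;> simp [hns]
  simp only [altGo, hcond, if_true]

theorem B_none (args : List String) (h1 : "--cmake-args" ∉ args) (h2 : "--make-args" ∉ args) :
    extract_cmake_and_make_arguments_alt args = (args, [], []) := by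
  show altGo args [] [] [] 0 [] = (args, [], [])
  rw [← List.append_nil args,
    altGo_pass0 args [] [] [] [] [] (fun t ht hm => by
      rcases hm with rfl | rfl
      · exact absurd ht h1
      · exact absurd ht h2)]
  simp [altGo]

theorem B_c (p q : List String) (h1 : "--cmake-args" ∉ p) (h2 : "--make-args" ∉ p)
    (h3 : "--make-args" ∉ q) :
    extract_cmake_and_make_arguments_alt (p ++ "--cmake-args" :: q) = (p, q, []) := by
  show altGo (p ++ "--cmake-args" :: q) [] [] [] 0 [] = (p, q, [])
  rw [altGo_pass0 p ("--cmake-args" :: q) [] [] [] [] (fun t ht hm => by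
      rcases hm with rfl | rfl
      · exact absurd ht h1
      · exact absurd ht h2)]
  rw [altGo_step_new _ _ _ _ _ _ _ (Or.inl rfl) (by simp)]
  have hadd : PySem.Set.add ([] : List String) "--cmake-args" = ["--cmake-args"] := by decide
  rw [if_pos (by decide), hadd, ← List.append_nil q,
    altGo_pass1 q [] ([] ++ p) [] [] ["--cmake-args"] (fun t ht hm => by
      rcases hm with rfl | rfl
      · simp
      · exact absurd ht h3)]
  simp [altGo]

theorem B_m (p q : List String) (h1 : "--cmake-args" ∉ p) (h2 : "--make-args" ∉ p)
    (h3 : "--cmake-args" ∉ q) :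
    extract_cmake_and_make_arguments_alt (p ++ "--make-args" :: q) = (p, [], q) := by
  show altGo (p ++ "--make-args" :: q) [] [] [] 0 [] = (p, [], q)
  rw [altGo_pass0 p ("--make-args" :: q) [] [] [] [] (fun t ht hm => by
      rcases hm with rfl | rfl
      · exact absurd ht h1
      · exact absurd ht h2)]
  rw [altGo_step_new _ _ _ _ _ _ _ (Or.inr rfl) (by simp)]
  have hadd : PySem.Set.add ([] : List String) "--make-args" = ["--make-args"] := by decide
  rw [if_neg (by decide), hadd, ← List.append_nil q,
    altGo_pass2 q [] ([] ++ p) [] [] ["--make-args"] (fun t ht hm => by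
      rcases hm with rfl | rfl
      · exact absurd ht h3
      · simp)]
  simp [altGo]

theorem B_cm (p r s : List String) (h1 : "--cmake-args" ∉ p) (h2 : "--make-args" ∉ p)
    (h3 : "--make-args" ∉ r) :
    extract_cmake_and_make_arguments_alt (p ++ "--cmake-args" :: (r ++ "--make-args" :: s))
      = (p, r, s) := by
  show altGo (p ++ "--cmake-args" :: (r ++ "--make-args" :: s)) [] [] [] 0 [] = (p, r, s)
  rw [altGo_pass0 p _ [] [] [] [] (fun t ht hm => by
      rcases hm with rfl | rfl
      · exact absurd ht h1
      · exact absurd ht h2)]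
  rw [altGo_step_new _ _ _ _ _ _ _ (Or.inl rfl) (by simp)]
  have hadd : PySem.Set.add ([] : List String) "--cmake-args" = ["--cmake-args"] := by decide
  rw [if_pos (by decide), hadd,
    altGo_pass1 r ("--make-args" :: s) ([] ++ p) [] [] ["--cmake-args"] (fun t ht hm => by
      rcases hm with rfl | rfl
      · simp
      · exact absurd ht h3)]
  rw [altGo_step_new _ _ _ _ _ _ _ (Or.inr rfl) (by decide)]
  have hadd2 : PySem.Set.add ["--cmake-args"] "--make-args" = ["--cmake-args", "--make-args"] := by
    decide
  rw [if_neg (by decide), hadd2, ← List.append_nil s,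
    altGo_pass2 s [] ([] ++ p) ([] ++ r) [] ["--cmake-args", "--make-args"] (fun t _ hm => by
      rcases hm with rfl | rfl <;> simp)]
  simp [altGo]

theorem B_mc (p r s : List String) (h1 : "--cmake-args" ∉ p) (h2 : "--make-args" ∉ p)
    (h3 : "--cmake-args" ∉ r) :
    extract_cmake_and_make_arguments_alt (p ++ "--make-args" :: (r ++ "--cmake-args" :: s))
      = (p, s, r) := by
  show altGo (p ++ "--make-args" :: (r ++ "--cmake-args" :: s)) [] [] [] 0 [] = (p, s, r)
  rw [altGo_pass0 p _ [] [] [] [] (fun t ht hm => by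
      rcases hm with rfl | rfl
      · exact absurd ht h1
      · exact absurd ht h2)]
  rw [altGo_step_new _ _ _ _ _ _ _ (Or.inr rfl) (by simp)]
  have hadd : PySem.Set.add ([] : List String) "--make-args" = ["--make-args"] := by decide
  rw [if_neg (by decide), hadd,
    altGo_pass2 r ("--cmake-args" :: s) ([] ++ p) [] [] ["--make-args"] (fun t ht hm => by
      rcases hm with rfl | rfl
      · exact absurd ht h3
      · simp)]
  rw [altGo_step_new _ _ _ _ _ _ _ (Or.inl rfl) (by decide)]
  have hadd2 : PySem.Set.add ["--make-args"] "--cmake-args" = ["--make-args", "--cmake-args"] := by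
    decide
  rw [if_pos (by decide), hadd2, ← List.append_nil s,
    altGo_pass1 s [] ([] ++ p) [] ([] ++ r) ["--make-args", "--cmake-args"] (fun t _ hm => by
      rcases hm with rfl | rfl <;> simp)]
  simp [altGo]

theorem A_none (args : List String) (h1 : "--cmake-args" ∉ args) (h2 : "--make-args" ∉ args) :
    extract_cmake_and_make_arguments args = (args, [], []) := by
  unfold extract_cmake_and_make_arguments
  have hs : PySem.List.sorted ([] : List Nat) (fun x => x) false = [] := by decide
  simp [List.foldl, h1, h2, hs]

theorem A_c (p q : List String) (h1 : "--cmake-args" ∉ p) (h2 : "--make-args" ∉ p)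
    (h3 : "--make-args" ∉ q) :
    extract_cmake_and_make_arguments (p ++ "--cmake-args" :: q) = (p, q, []) := by
  have hidx : List.idxOf? "--cmake-args" (p ++ "--cmake-args" :: q) = some p.length := by
    rw [← PySem.List.index?_eq_idxOf?]
    exact (PySem.List.index?_eq_some_iff _ _ _).mpr ⟨p, q, rfl, rfl, h1⟩
  have hkeys : (PySem.Dict.empty.insert p.length "--cmake-args").keys = [p.length] := by
    rw [PySem.Dict.keys_insert_of_not_contains _ _ (PySem.Dict.contains_empty _)]
    simp [PySem.Dict.keys_empty]
  have hsort : PySem.List.sorted [p.length] (fun x => x) false = [p.length] := by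
    apply PySem.List.sorted_eq_self_of_pairwise
    simp
  have hsplit : pySplitArguments (p ++ "--cmake-args" :: q) "--cmake-args" = (p, some q) :=
    pySplit_first p q _ h1
  unfold extract_cmake_and_make_arguments
  simp [List.foldl, h2, h3, hidx, hkeys, hsort, hsplit, PySem.Dict.get?_insert_self]

theorem A_m (p q : List String) (h1 : "--cmake-args" ∉ p) (h2 : "--make-args" ∉ p)
    (h3 : "--cmake-args" ∉ q) :
    extract_cmake_and_make_arguments (p ++ "--make-args" :: q) = (p, [], q) := by
  have hidx : List.idxOf? "--make-args" (p ++ "--make-args" :: q) = some p.length := by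
    rw [← PySem.List.index?_eq_idxOf?]
    exact (PySem.List.index?_eq_some_iff _ _ _).mpr ⟨p, q, rfl, rfl, h2⟩
  have hkeys : (PySem.Dict.empty.insert p.length "--make-args").keys = [p.length] := by
    rw [PySem.Dict.keys_insert_of_not_contains _ _ (PySem.Dict.contains_empty _)]
    simp [PySem.Dict.keys_empty]
  have hsort : PySem.List.sorted [p.length] (fun x => x) false = [p.length] := by
    apply PySem.List.sorted_eq_self_of_pairwise
    simp
  have hsplit : pySplitArguments (p ++ "--make-args" :: q) "--make-args" = (p, some q) :=
    pySplit_first p q _ h2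
  unfold extract_cmake_and_make_arguments
  simp [List.foldl, h1, h3, hidx, hkeys, hsort, hsplit, PySem.Dict.get?_insert_self]

theorem A_cm (p r s : List String) (h1 : "--cmake-args" ∉ p) (h2 : "--make-args" ∉ p)
    (h3 : "--make-args" ∉ r) :
    extract_cmake_and_make_arguments (p ++ "--cmake-args" :: (r ++ "--make-args" :: s))
      = (p, r, s) := by
  have hpre : "--make-args" ∉ p ++ "--cmake-args" :: r := by simp [h2, h3]
  have hassoc : (p ++ "--cmake-args" :: r) ++ "--make-args" :: s
      = p ++ "--cmake-args" :: (r ++ "--make-args" :: s) := by simp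
  have hidxC : List.idxOf? "--cmake-args" (p ++ "--cmake-args" :: (r ++ "--make-args" :: s))
      = some p.length := by
    rw [← PySem.List.index?_eq_idxOf?]
    exact (PySem.List.index?_eq_some_iff _ _ _).mpr ⟨p, r ++ "--make-args" :: s, rfl, rfl, h1⟩
  have hidxM : List.idxOf? "--make-args" (p ++ "--cmake-args" :: (r ++ "--make-args" :: s))
      = some (p.length + 1 + r.length) := by
    rw [← PySem.List.index?_eq_idxOf?]
    refine (PySem.List.index?_eq_some_iff _ _ _).mpr
      ⟨p ++ "--cmake-args" :: r, s, hassoc.symm, by simp; omega, hpre⟩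
  have hne : ((p.length + 1 + r.length : Nat) == p.length) = false := by
    simp
    omega
  have hcont : (PySem.Dict.empty.insert p.length "--cmake-args").contains
      (p.length + 1 + r.length) = false := by
    rw [PySem.Dict.contains_insert]
    simp [hne, PySem.Dict.contains_empty]
  have hkeys : ((PySem.Dict.empty.insert p.length "--cmake-args").insert
      (p.length + 1 + r.length) "--make-args").keys = [p.length, p.length + 1 + r.length] := by
    rw [PySem.Dict.keys_insert_of_not_contains _ _ hcont,
      PySem.Dict.keys_insert_of_not_contains _ _ (PySem.Dict.contains_empty _)]
    simp [PySem.Dict.keys_empty]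
  have hsort : PySem.List.sorted [p.length, p.length + 1 + r.length] (fun x => x) false
      = [p.length, p.length + 1 + r.length] := by
    apply PySem.List.sorted_eq_self_of_pairwise
    simp
    omega
  have hgetM : ((PySem.Dict.empty.insert p.length "--cmake-args").insert
      (p.length + 1 + r.length) "--make-args").get? (p.length + 1 + r.length)
      = some "--make-args" := PySem.Dict.get?_insert_self _ _ _
  have hgetC : ((PySem.Dict.empty.insert p.length "--cmake-args").insert
      (p.length + 1 + r.length) "--make-args").get? p.length = some "--cmake-args" := by
    rw [PySem.Dict.get?_insert_of_ne _ _ (by omega)]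
    exact PySem.Dict.get?_insert_self _ _ _
  have hsplitM : pySplitArguments (p ++ "--cmake-args" :: (r ++ "--make-args" :: s))
      "--make-args" = (p ++ "--cmake-args" :: r, some s) := by
    rw [← hassoc]
    exact pySplit_first _ s _ hpre
  have hsplitC : pySplitArguments (p ++ "--cmake-args" :: r) "--cmake-args"
      = (p, some r) := pySplit_first p r _ h1
  unfold extract_cmake_and_make_arguments
  simp [List.foldl, hidxC, hidxM, hkeys, hsort, hgetM, hgetC, hsplitM, hsplitC, h2, h3]

theorem A_mc (p r s : List String) (h1 : "--cmake-args" ∉ p) (h2 : "--make-args" ∉ p)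
    (h3 : "--cmake-args" ∉ r) :
    extract_cmake_and_make_arguments (p ++ "--make-args" :: (r ++ "--cmake-args" :: s))
      = (p, s, r) := by
  have hpre : "--cmake-args" ∉ p ++ "--make-args" :: r := by simp [h1, h3]
  have hassoc : (p ++ "--make-args" :: r) ++ "--cmake-args" :: s
      = p ++ "--make-args" :: (r ++ "--cmake-args" :: s) := by simp
  have hidxM : List.idxOf? "--make-args" (p ++ "--make-args" :: (r ++ "--cmake-args" :: s))
      = some p.length := by
    rw [← PySem.List.index?_eq_idxOf?]
    exact (PySem.List.index?_eq_some_iff _ _ _).mpr ⟨p, r ++ "--cmake-args" :: s, rfl, rfl, h2⟩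
  have hidxC : List.idxOf? "--cmake-args" (p ++ "--make-args" :: (r ++ "--cmake-args" :: s))
      = some (p.length + 1 + r.length) := by
    rw [← PySem.List.index?_eq_idxOf?]
    refine (PySem.List.index?_eq_some_iff _ _ _).mpr
      ⟨p ++ "--make-args" :: r, s, hassoc.symm, by simp; omega, hpre⟩
  have hcont : (PySem.Dict.empty.insert (p.length + 1 + r.length) "--cmake-args").contains
      p.length = false := by
    rw [PySem.Dict.contains_insert]
    simp [PySem.Dict.contains_empty]
    omega
  have hkeys : ((PySem.Dict.empty.insert (p.length + 1 + r.length) "--cmake-args").insert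
      p.length "--make-args").keys = [p.length + 1 + r.length, p.length] := by
    rw [PySem.Dict.keys_insert_of_not_contains _ _ hcont,
      PySem.Dict.keys_insert_of_not_contains _ _ (PySem.Dict.contains_empty _)]
    simp [PySem.Dict.keys_empty]
  have hsort : PySem.List.sorted [p.length + 1 + r.length, p.length] (fun x => x) false
      = [p.length, p.length + 1 + r.length] := by
    apply PySem.List.sorted_eq_of_perm_of_pairwise_lt
    · exact List.Perm.swap _ _ _
    · simp
      omega
  have hgetM : ((PySem.Dict.empty.insert (p.length + 1 + r.length) "--cmake-args").insert
      p.length "--make-args").get? p.length = some "--make-args" :=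
    PySem.Dict.get?_insert_self _ _ _
  have hgetC : ((PySem.Dict.empty.insert (p.length + 1 + r.length) "--cmake-args").insert
      p.length "--make-args").get? (p.length + 1 + r.length) = some "--cmake-args" := by
    rw [PySem.Dict.get?_insert_of_ne _ _ (by omega)]
    exact PySem.Dict.get?_insert_self _ _ _
  have hsplitC : pySplitArguments (p ++ "--make-args" :: (r ++ "--cmake-args" :: s))
      "--cmake-args" = (p ++ "--make-args" :: r, some s) := by
    rw [← hassoc]
    exact pySplit_first _ s _ hpre
  have hsplitM : pySplitArguments (p ++ "--make-args" :: r) "--make-args"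
      = (p, some r) := pySplit_first p r _ h2
  unfold extract_cmake_and_make_arguments
  simp [List.foldl, hidxC, hidxM, hkeys, hsort, hgetM, hgetC, hsplitM, hsplitC, h1, h3]

theorem equiv_main (args : List String) :
    extract_cmake_and_make_arguments args = extract_cmake_and_make_arguments_alt args := by
  by_cases hC : "--cmake-args" ∈ args
  · rcases first_split "--cmake-args" args hC with ⟨p, q, rfl, hCp⟩
    by_cases hMp : "--make-args" ∈ p
    · rcases first_split "--make-args" p hMp with ⟨p', r', rfl, hMp'⟩
      have hCp' : "--cmake-args" ∉ p' := fun h => hCp (by simp [h])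
      have hCr' : "--cmake-args" ∉ r' := fun h => hCp (by simp [h])
      have hre : (p' ++ "--make-args" :: r') ++ "--cmake-args" :: q
          = p' ++ "--make-args" :: (r' ++ "--cmake-args" :: q) := by simp
      rw [hre, A_mc p' r' q hCp' hMp' hCr', B_mc p' r' q hCp' hMp' hCr']
    · by_cases hMq : "--make-args" ∈ q
      · rcases first_split "--make-args" q hMq with ⟨r, s, rfl, hMr⟩
        rw [A_cm p r s hCp hMp hMr, B_cm p r s hCp hMp hMr]
      · rw [A_c p q hCp hMp hMq, B_c p q hCp hMp hMq]
  · by_cases hM : "--make-args" ∈ args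
    · rcases first_split "--make-args" args hM with ⟨p, q, rfl, hMp⟩
      have hCp : "--cmake-args" ∉ p := fun h => hC (by simp [h])
      have hCq : "--cmake-args" ∉ q := fun h => hC (by simp [h])
      rw [A_m p q hCp hMp hCq, B_m p q hCp hMp hCq]
    · rw [A_none args hC hM, B_none args hC hM]

-- ===== VERDICT (by name: the statement is the Claim_ definition above) =====
theorem extract_cmake_and_make_arguments_spec : Claim_equal_extract_cmake_and_make_arguments := by
  intro args _
  unfold Spec_extract_cmake_and_make_arguments
  exact equiv_main args
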